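-- pv_equiv track=rewrite | github.com/machbase/machbase-mcp-server | Machbase_MCP_Sever/Machbase.py | _calculate_next_position
-- ===== SOURCE A (Python) =====
-- from typing import Any, Dict, List, Optional, Set, Tuple
--
-- GRID_COLS = 36
--
-- CHART_W_LARGE = 17   # Line, Bar, Scatter, Tql chart
--
-- CHART_H_DEFAULT = 7
--
-- def _calculate_next_position(
--     existing_panels: list,
--     needed_w: int,
-- ) -> Tuple[int, int]:
--     """Calculate next (x, y) position for auto-layout on the grid.
--
--     Places panels left-to-right, wrapping to next row when full.
--     Returns (x, y) tuple.
--     """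
--     if not existing_panels:
--         return 0, 0
--
--     max_bottom = max(p.get("y", 0) + p.get("h", CHART_H_DEFAULT) for p in existing_panels)
--     last_row_y = max(p.get("y", 0) for p in existing_panels)
--     last_row_panels = [p for p in existing_panels if p.get("y", 0) == last_row_y]
--     last_row_right = max(
--         p.get("x", 0) + p.get("w", CHART_W_LARGE) for p in last_row_panels
--     ) if last_row_panels else 0
--
--     if last_row_right + needed_w <= GRID_COLS:
--         return last_row_right, last_row_y
--     else:
--         return 0, max_bottom
-- ===== SOURCE B (Python) =====
-- from typing import Tuple
--
-- GRID_COLS = 36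
-- CHART_W_LARGE = 17
-- CHART_H_DEFAULT = 7
--
-- def _calculate_next_position(
--     existing_panels: list,
--     needed_w: int,
-- ) -> Tuple[int, int]:
--     """Single-pass version: one loop keeps (max_bottom, last_row_y, last_row_right)."""
--     if not existing_panels:
--         return 0, 0
--     it = iter(existing_panels)
--     p0 = next(it)
--     bottom = p0.get("y", 0) + p0.get("h", CHART_H_DEFAULT)
--     row_y = p0.get("y", 0)
--     row_right = p0.get("x", 0) + p0.get("w", CHART_W_LARGE)
--     for p in it:
--         y = p.get("y", 0)
--         b = y + p.get("h", CHART_H_DEFAULT)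
--         r = p.get("x", 0) + p.get("w", CHART_W_LARGE)
--         if b > bottom:
--             bottom = b
--         if y > row_y:
--             row_y, row_right = y, r
--         elif y == row_y and r > row_right:
--             row_right = r
--     if row_right + needed_w <= GRID_COLS:
--         return row_right, row_y
--     else:
--         return 0, bottom
-- ===== Notes on version B (the rewrite author's own statement) =====
-- stated objective: simpler
-- what changed: Replaces A's three separate passes over the panels (two max-comprehensions and a filter-then-max over the last row) with one single loop that maintains (max_bottom, last_row_y, last_row_right) together, resetting last_row_right whenever a higher row is seen.
import Mathlib
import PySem

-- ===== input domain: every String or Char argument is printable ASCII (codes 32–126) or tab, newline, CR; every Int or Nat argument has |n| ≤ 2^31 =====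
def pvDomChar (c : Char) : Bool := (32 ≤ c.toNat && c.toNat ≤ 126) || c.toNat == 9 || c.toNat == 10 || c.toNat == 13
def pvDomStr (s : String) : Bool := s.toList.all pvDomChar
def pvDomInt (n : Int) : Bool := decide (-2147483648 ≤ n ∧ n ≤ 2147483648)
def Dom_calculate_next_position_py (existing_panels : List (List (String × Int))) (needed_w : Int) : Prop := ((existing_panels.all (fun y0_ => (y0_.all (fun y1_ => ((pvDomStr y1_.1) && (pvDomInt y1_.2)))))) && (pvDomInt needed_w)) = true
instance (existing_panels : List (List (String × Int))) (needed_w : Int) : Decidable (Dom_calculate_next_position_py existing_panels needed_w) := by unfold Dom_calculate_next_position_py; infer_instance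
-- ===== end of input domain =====

-- B replaces A's three passes (two max-comprehensions plus a filter-then-max) by a single
-- loop maintaining (max_bottom, last_row_y, last_row_right); objective: simpler/one pass.

-- shared helper: p.get(k, d) on the panel dict (association list, first match)
def pvPGet (p : List (String × Int)) (k : String) (d : Int) : Int :=
  PySem.Dict.getD (PySem.Dict.mk p) k d

def pvY (p : List (String × Int)) : Int := pvPGet p "y" 0
def pvB (p : List (String × Int)) : Int := pvPGet p "y" 0 + pvPGet p "h" 7
def pvR (p : List (String × Int)) : Int := pvPGet p "x" 0 + pvPGet p "w" 17

-- ===== PORT A =====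
def calculate_next_position_py (existing_panels : List (List (String × Int))) (needed_w : Int) : Int × Int :=
  match existing_panels with
  | [] => (0, 0)
  | p0 :: rest =>
    -- max(p.get("y",0)+p.get("h",7) for p in existing_panels)  (running max over nonempty list)
    let max_bottom := rest.foldl (fun a p => max a (pvB p)) (pvB p0)
    let last_row_y := rest.foldl (fun a p => max a (pvY p)) (pvY p0)
    let last_row_panels := (p0 :: rest).filter (fun p => pvY p = last_row_y)
    let last_row_right :=
      match last_row_panels with
      | [] => 0
      | q0 :: qs => qs.foldl (fun a p => max a (pvR p)) (pvR q0)
    if last_row_right + needed_w ≤ 36 then (last_row_right, last_row_y)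
    else (0, max_bottom)

-- ===== PORT B =====
-- one step of B's single loop over the remaining panels
def pvStep (acc : Int × Int × Int) (p : List (String × Int)) : Int × Int × Int :=
  let bottom := if pvB p > acc.1 then pvB p else acc.1
  if pvY p > acc.2.1 then (bottom, pvY p, pvR p)
  else if pvY p = acc.2.1 ∧ pvR p > acc.2.2 then (bottom, acc.2.1, pvR p)
  else (bottom, acc.2.1, acc.2.2)

def calculate_next_position_py_alt (existing_panels : List (List (String × Int))) (needed_w : Int) : Int × Int :=
  match existing_panels with
  | [] => (0, 0)
  | p0 :: rest =>
    let acc := rest.foldl pvStep (pvB p0, pvY p0, pvR p0)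
    if acc.2.2 + needed_w ≤ 36 then (acc.2.2, acc.2.1)
    else (0, acc.1)

-- ===== PRECONDITION & SPEC =====
def Spec_calculate_next_position_py (existing_panels : List (List (String × Int))) (needed_w : Int) (out : Int × Int) : Prop := out = calculate_next_position_py_alt existing_panels needed_w
instance (existing_panels : List (List (String × Int))) (needed_w : Int) (out : Int × Int) : Decidable (Spec_calculate_next_position_py existing_panels needed_w out) := by unfold Spec_calculate_next_position_py; infer_instance

-- ===== CLAIM (what is proved, stated in full; the proofs are below) =====
def Claim_equal_calculate_next_position_py : Prop := ∀ (existing_panels : List (List (String × Int))) (needed_w : Int), Dom_calculate_next_position_py existing_panels needed_w → Spec_calculate_next_position_py existing_panels needed_w (calculate_next_position_py existing_panels needed_w)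

-- ===== LEMMAS AND PROOFS =====

-- what B's third accumulator component denotes, in A's vocabulary
def pvRRSpec (l : List (List (String × Int))) (M ry rr : Int) : Int :=
  if ry = M then (l.filter (fun p => pvY p = M)).foldl (fun a p => max a (pvR p)) rr
  else
    match l.filter (fun p => pvY p = M) with
    | [] => rr
    | q0 :: qs => qs.foldl (fun a p => max a (pvR p)) (pvR q0)

lemma pv_le_foldl_maxY (l : List (List (String × Int))) (ry : Int) :
    ry ≤ l.foldl (fun a p => max a (pvY p)) ry := by
  induction l generalizing ry with
  | nil => simp
  | cons p t ih => exact le_trans (le_max_left _ _) (ih _)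

lemma pv_foldl_maxY_attained (l : List (List (String × Int))) (ry : Int) :
    l.foldl (fun a p => max a (pvY p)) ry = ry ∨
      ∃ p ∈ l, pvY p = l.foldl (fun a p => max a (pvY p)) ry := by
  induction l generalizing ry with
  | nil => left; rfl
  | cons q t ih =>
    rcases ih (max ry (pvY q)) with h | ⟨p, hp, he⟩
    · simp only [List.foldl_cons, h]
      rcases (by omega : pvY q ≤ ry ∨ ry < pvY q) with hle | hlt
      · left; omega
      · right; exact ⟨q, by simp, by omega⟩
    · right; exact ⟨p, by simp [hp], he⟩

lemma pv_filter_ne_nil (l : List (List (String × Int))) (ry : Int)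
    (h : l.foldl (fun a p => max a (pvY p)) ry ≠ ry) :
    l.filter (fun p => pvY p = l.foldl (fun a p => max a (pvY p)) ry) ≠ [] := by
  rcases pv_foldl_maxY_attained l ry with ha | ⟨p, hp, he⟩
  · exact absurd ha h
  · intro hcontra
    have hm : p ∈ l.filter (fun p => pvY p = l.foldl (fun a p => max a (pvY p)) ry) := by
      simp [List.mem_filter, hp, he]
    rw [hcontra] at hm; exact absurd hm (List.not_mem_nil)

lemma pvStep_inv (l : List (List (String × Int))) (b ry rr : Int) :
    (l.foldl pvStep (b, ry, rr)).1 = l.foldl (fun a p => max a (pvB p)) b ∧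
    (l.foldl pvStep (b, ry, rr)).2.1 = l.foldl (fun a p => max a (pvY p)) ry ∧
    (l.foldl pvStep (b, ry, rr)).2.2 =
      pvRRSpec l (l.foldl (fun a p => max a (pvY p)) ry) ry rr := by
  induction l generalizing b ry rr with
  | nil => refine ⟨rfl, rfl, ?_⟩; simp [pvRRSpec]
  | cons p t ih =>
    simp only [List.foldl_cons]
    have hb : (if pvB p > b then pvB p else b) = max b (pvB p) := by omega
    rcases lt_trichotomy ry (pvY p) with hy | hy | hy
    · -- ry < pvY p : new last row begins at p
      have hstep : pvStep (b, ry, rr) p = (max b (pvB p), pvY p, pvR p) := by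
        simp only [pvStep]; rw [hb, if_pos (by omega : pvY p > ry)]
      rw [hstep]
      obtain ⟨i1, i2, i3⟩ := ih (max b (pvB p)) (pvY p) (pvR p)
      have hmax : max ry (pvY p) = pvY p := by omega
      refine ⟨i1, by rw [i2, hmax], ?_⟩
      rw [i3, hmax]
      set M := t.foldl (fun a q => max a (pvY q)) (pvY p) with hMdef
      have hle : pvY p ≤ M := pv_le_foldl_maxY t (pvY p)
      have hry : ¬ ry = M := by omega
      by_cases hpm : pvY p = M
      · simp only [pvRRSpec, if_neg hry, List.filter_cons,
          decide_eq_true_eq, if_pos hpm]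
      · have hne : t.filter (fun q => pvY q = M) ≠ [] := by
          have := pv_filter_ne_nil t (pvY p) (by rw [← hMdef]; omega)
          rwa [← hMdef] at this
        cases hf : t.filter (fun q => pvY q = M) with
        | nil => exact absurd hf hne
        | cons q0 qs =>
          simp only [pvRRSpec, if_neg hry, List.filter_cons,
            decide_eq_true_eq, if_neg hpm, hf]
    · -- ry = pvY p : same row
      have hmax : max ry (pvY p) = ry := by omega
      by_cases hr : pvR p > rr
      · have hstep : pvStep (b, ry, rr) p = (max b (pvB p), ry, pvR p) := by
          simp only [pvStep]
          rw [hb, if_neg (by omega : ¬ pvY p > ry), if_pos ⟨hy.symm, hr⟩]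
        rw [hstep]
        obtain ⟨i1, i2, i3⟩ := ih (max b (pvB p)) ry (pvR p)
        refine ⟨i1, by rw [i2, hmax], ?_⟩
        rw [i3, hmax]
        set M := t.foldl (fun a q => max a (pvY q)) ry with hMdef
        by_cases hry : ry = M
        · simp only [pvRRSpec, if_pos hry, List.filter_cons, decide_eq_true_eq,
            if_pos (by omega : pvY p = M), List.foldl_cons]
          congr 1; omega
        · have hle : ry ≤ M := pv_le_foldl_maxY t ry
          have hne : t.filter (fun q => pvY q = M) ≠ [] := by
            have := pv_filter_ne_nil t ry (by rw [← hMdef]; omega)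
            rwa [← hMdef] at this
          cases hf : t.filter (fun q => pvY q = M) with
          | nil => exact absurd hf hne
          | cons q0 qs =>
            simp only [pvRRSpec, if_neg hry, List.filter_cons, decide_eq_true_eq,
              if_neg (by omega : ¬ pvY p = M), hf]
      · have hstep : pvStep (b, ry, rr) p = (max b (pvB p), ry, rr) := by
          simp only [pvStep]
          rw [hb, if_neg (by omega : ¬ pvY p > ry),
            if_neg (by omega : ¬ (pvY p = ry ∧ pvR p > rr))]
        rw [hstep]
        obtain ⟨i1, i2, i3⟩ := ih (max b (pvB p)) ry rr
        refine ⟨i1, by rw [i2, hmax], ?_⟩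
        rw [i3, hmax]
        set M := t.foldl (fun a q => max a (pvY q)) ry with hMdef
        by_cases hry : ry = M
        · simp only [pvRRSpec, if_pos hry, List.filter_cons, decide_eq_true_eq,
            if_pos (by omega : pvY p = M), List.foldl_cons]
          congr 1; omega
        · simp only [pvRRSpec, if_neg hry, List.filter_cons, decide_eq_true_eq,
            if_neg (by omega : ¬ pvY p = M)]
    · -- pvY p < ry : panel below the last row, dropped
      have hstep : pvStep (b, ry, rr) p = (max b (pvB p), ry, rr) := by
        simp only [pvStep]
        rw [hb, if_neg (by omega : ¬ pvY p > ry),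
          if_neg (by omega : ¬ (pvY p = ry ∧ pvR p > rr))]
      rw [hstep]
      obtain ⟨i1, i2, i3⟩ := ih (max b (pvB p)) ry rr
      have hmax : max ry (pvY p) = ry := by omega
      refine ⟨i1, by rw [i2, hmax], ?_⟩
      rw [i3, hmax]
      set M := t.foldl (fun a q => max a (pvY q)) ry with hMdef
      have hle : ry ≤ M := pv_le_foldl_maxY t ry
      by_cases hry : ry = M
      · simp only [pvRRSpec, if_pos hry, List.filter_cons, decide_eq_true_eq,
          if_neg (by omega : ¬ pvY p = M)]
      · simp only [pvRRSpec, if_neg hry, List.filter_cons, decide_eq_true_eq,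
          if_neg (by omega : ¬ pvY p = M)]

-- ===== VERDICT (by name: the statement is the Claim_ definition above) =====
theorem calculate_next_position_py_spec : Claim_equal_calculate_next_position_py := by
  intro existing_panels needed_w _
  unfold Spec_calculate_next_position_py
  cases existing_panels with
  | nil => rfl
  | cons p0 rest =>
    simp only [calculate_next_position_py, calculate_next_position_py_alt]
    obtain ⟨h1, h2, h3⟩ := pvStep_inv rest (pvB p0) (pvY p0) (pvR p0)
    set M := rest.foldl (fun a p => max a (pvY p)) (pvY p0) with hMdef
    have hle : pvY p0 ≤ M := pv_le_foldl_maxY rest (pvY p0)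
    -- A's last_row_right equals pvRRSpec rest M (pvY p0) (pvR p0)
    have hA : (match (p0 :: rest).filter (fun p => pvY p = M) with
        | [] => (0 : Int)
        | q0 :: qs => qs.foldl (fun a p => max a (pvR p)) (pvR q0)) =
        pvRRSpec rest M (pvY p0) (pvR p0) := by
      by_cases h0 : pvY p0 = M
      · simp only [List.filter_cons, decide_eq_true_eq, h0, if_pos, pvRRSpec]
      · have hne : rest.filter (fun p => pvY p = M) ≠ [] := by
          rcases pv_foldl_maxY_attained rest (pvY p0) with ha | ⟨p, hp, he⟩
          · exact absurd ha.symm h0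
          · intro hcontra
            have : p ∈ rest.filter (fun p => pvY p = M) := by
              simp [List.mem_filter, hp, he, hMdef]
            rw [hcontra] at this; exact absurd this (List.not_mem_nil)
        cases hf : rest.filter (fun p => pvY p = M) with
        | nil => exact absurd hf hne
        | cons q0 qs =>
          simp only [List.filter_cons, decide_eq_true_eq, if_neg h0, pvRRSpec, hf]
    rw [h1, h2, h3, ← hMdef] at *
    rw [← hA]
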